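-- pv_equiv track=rewrite | github.com/FLCarpenter/PhyloCode | Recoder.py | Binary_Recoding_Codon_NT3R
-- ===== SOURCE A (Python) =====
-- def Binary_Recoding_Codon_NT3R(Sequence, Position):
--     Pos = int(Position)
--     Index = 1 + (2 - Pos)
--     recoded_seq = ''
--     for base in Sequence:
--         if (Index + 2) % 2 == 0:
--             if base in 'AGag':
--                 recoded_seq += '0'
--             elif base in 'TCtc':
--                 recoded_seq += '1'
--             else:
--                 recoded_seq += '-'
--         else:
--             recoded_seq += base
--         Index += 1
--     return recoded_seq
-- ===== SOURCE B (Python) =====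
-- def Binary_Recoding_Codon_NT3R(Sequence, Position):
--     # Recode only the strided positions i with (3 - int(Position) + i) even,
--     # i.e. i % 2 == (int(Position) + 1) % 2, in one strided pass over a list copy.
--     start = (int(Position) + 1) % 2
--     chars = list(Sequence)
--     for i in range(start, len(chars), 2):
--         c = Sequence[i]
--         if c in 'AGag':
--             chars[i] = '0'
--         elif c in 'TCtc':
--             chars[i] = '1'
--         else:
--             chars[i] = '-'
--     return ''.join(chars)
-- ===== Notes on version B (the rewrite author's own statement) =====
-- stated objective: faster
-- what changed: Replaces the per-character parity branch and repeated string concatenation with a precomputed offset (Position+1) % 2 and a single strided pass that rewrites only the recoded positions of a list copy, joined once at the end.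
import Mathlib
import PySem

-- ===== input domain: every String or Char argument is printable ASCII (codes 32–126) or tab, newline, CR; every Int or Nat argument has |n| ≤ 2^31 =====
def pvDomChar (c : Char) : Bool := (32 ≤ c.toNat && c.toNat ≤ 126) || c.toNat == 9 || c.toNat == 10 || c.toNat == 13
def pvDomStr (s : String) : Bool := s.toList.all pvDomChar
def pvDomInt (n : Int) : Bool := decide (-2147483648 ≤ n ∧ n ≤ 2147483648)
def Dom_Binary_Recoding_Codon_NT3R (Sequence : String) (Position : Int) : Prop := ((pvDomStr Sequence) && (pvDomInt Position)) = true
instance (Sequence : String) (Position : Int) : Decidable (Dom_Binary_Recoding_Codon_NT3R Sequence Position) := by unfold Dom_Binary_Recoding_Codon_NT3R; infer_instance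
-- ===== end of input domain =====

-- B replaces A's per-character parity branch by a precomputed offset (Position+1) % 2
-- and a single strided pass that rewrites only the recoded positions of a list copy.

-- ===== PORT A =====
-- literal transliteration: running Index counter, result built by appending one char per base
def Binary_Recoding_Codon_NT3R (Sequence : String) (Position : Int) : String :=
  let Pos : Int := Position
  let Index : Int := 1 + (2 - Pos)
  let st := Sequence.toList.foldl (fun (st : List Char × Int) base =>
      let recoded_seq :=
        if PySem.Int.mod (st.2 + 2) 2 == 0 then
          if "AGag".toList.contains base then st.1 ++ ['0']
          else if "TCtc".toList.contains base then st.1 ++ ['1']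
          else st.1 ++ ['-']
        else st.1 ++ [base]
      (recoded_seq, st.2 + 1)) ([], Index)
  String.ofList st.1

-- ===== PORT B =====
def pvRecodeChar (c : Char) : Char :=
  if "AGag".toList.contains c then '0'
  else if "TCtc".toList.contains c then '1'
  else '-'

def Binary_Recoding_Codon_NT3R_alt (Sequence : String) (Position : Int) : String :=
  let start : Int := PySem.Int.mod (Position + 1) 2
  let chars := Sequence.toList
  let chars := (PySem.List.pyRange start (chars.length : Int) 2).foldl
      (fun l i =>
        match PySem.Str.pyGet? Sequence i with   -- Sequence[i]; i always in range here
        | some c => l.set i.toNat (pvRecodeChar c)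
        | none   => l) chars
  String.ofList chars

-- ===== PRECONDITION & SPEC =====
def Spec_Binary_Recoding_Codon_NT3R (Sequence : String) (Position : Int) (out : String) : Prop := out = Binary_Recoding_Codon_NT3R_alt Sequence Position
instance (Sequence : String) (Position : Int) (out : String) : Decidable (Spec_Binary_Recoding_Codon_NT3R Sequence Position out) := by unfold Spec_Binary_Recoding_Codon_NT3R; infer_instance

-- ===== CLAIM (what is proved, stated in full; the proofs are below) =====
def Claim_equal_Binary_Recoding_Codon_NT3R : Prop := ∀ (Sequence : String) (Position : Int), Dom_Binary_Recoding_Codon_NT3R Sequence Position → Spec_Binary_Recoding_Codon_NT3R Sequence Position (Binary_Recoding_Codon_NT3R Sequence Position)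

-- ===== LEMMAS AND PROOFS =====

-- reference form: the recoded character list, by structural recursion with the running index
def pvSpecFrom (idx : Int) : List Char → List Char
  | [] => []
  | c :: cs =>
      (if PySem.Int.mod (idx + 2) 2 == 0 then pvRecodeChar c else c) :: pvSpecFrom (idx + 1) cs

theorem pvSpecFrom_length (idx : Int) (cs : List Char) : (pvSpecFrom idx cs).length = cs.length := by
  induction cs generalizing idx with
  | nil => rfl
  | cons c cs ih => simp [pvSpecFrom, ih]

theorem pvSpecFrom_getElem (idx : Int) (cs : List Char) (j : Nat) (hj : j < cs.length) :
    (pvSpecFrom idx cs)[j]'(by simpa [pvSpecFrom_length] using hj) =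
      (if PySem.Int.mod (idx + j + 2) 2 == 0 then pvRecodeChar cs[j] else cs[j]) := by
  induction cs generalizing idx j with
  | nil => simp at hj
  | cons c cs ih =>
      cases j with
      | zero => simp [pvSpecFrom]
      | succ k =>
          have hk : k < cs.length := Nat.lt_of_succ_lt_succ hj
          simpa [pvSpecFrom, add_assoc, add_comm, add_left_comm] using ih (idx + 1) k hk

-- A's fold equals the reference form
theorem pvA_fold (cs : List Char) (acc : List Char) (idx : Int) :
    (cs.foldl (fun (st : List Char × Int) base =>
      let recoded_seq :=
        if PySem.Int.mod (st.2 + 2) 2 == 0 then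
          if "AGag".toList.contains base then st.1 ++ ['0']
          else if "TCtc".toList.contains base then st.1 ++ ['1']
          else st.1 ++ ['-']
        else st.1 ++ [base]
      (recoded_seq, st.2 + 1)) (acc, idx)).1 = acc ++ pvSpecFrom idx cs := by
  induction cs generalizing acc idx with
  | nil => simp [pvSpecFrom]
  | cons c cs ih =>
      simp only [List.foldl_cons, pvSpecFrom]
      rw [ih]
      by_cases h : PySem.Int.mod (idx + 2) 2 == 0 <;>
        simp [pvRecodeChar] <;> split_ifs <;> simp

-- generic strided-write fold: length is preserved
theorem pv_setAll_length (S : List Int) (f : Nat → Char) (l : List Char) :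
    (S.foldl (fun l i => l.set i.toNat (f i.toNat)) l).length = l.length := by
  induction S generalizing l with
  | nil => rfl
  | cons k S ih => simp [ih]

-- generic strided-write fold: pointwise value (indices all nonnegative)
theorem pv_setAll_getElem (S : List Int) (hS : ∀ i ∈ S, 0 ≤ i) (f : Nat → Char) (l : List Char)
    (j : Nat) (hj : j < l.length) :
    (S.foldl (fun l i => l.set i.toNat (f i.toNat)) l)[j]'(by simpa [pv_setAll_length] using hj) =
      (if (j : Int) ∈ S then f j else l[j]) := by
  induction S generalizing l with
  | nil => simp
  | cons k S ih =>
      have hk0 : 0 ≤ k := hS k List.mem_cons_self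
      have hS' : ∀ i ∈ S, 0 ≤ i := fun i hi => hS i (List.mem_cons_of_mem _ hi)
      simp only [List.foldl_cons]
      rw [ih hS' (l.set k.toNat (f k.toNat)) (by simpa using hj)]
      by_cases hmem : (j : Int) ∈ S
      · simp [hmem]
      · by_cases hkj : k = (j : Int)
        · have hkn : k.toNat = j := by omega
          simp [hmem, hkj]
        · have hkn : k.toNat ≠ j := by omega
          rw [List.getElem_set_ne hkn]
          have hne : ¬ ((j : Int) = k) := fun h => hkj h.symm
          simp [hmem, hne]

theorem Binary_Recoding_Codon_NT3R_spec : Claim_equal_Binary_Recoding_Codon_NT3R := by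
  intro Sequence Position _
  show _ = _
  unfold Binary_Recoding_Codon_NT3R Binary_Recoding_Codon_NT3R_alt
  simp only []
  set cs := Sequence.toList with hcs
  set start : Int := PySem.Int.mod (Position + 1) 2 with hstart
  have hstartmod : start % 2 = (Position + 1) % 2 := by
    rw [hstart, PySem.Int.mod_eq_emod_of_pos (by norm_num)]
    omega
  have hstart01 : start = 0 ∨ start = 1 := by
    rw [hstart, PySem.Int.mod_eq_emod_of_pos (by norm_num)]
    omega
  -- rewrite B's fold into the generic strided write of pvRecodeChar of the original chars
  have hBfold :
      (PySem.List.pyRange start (cs.length : Int) 2).foldl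
        (fun l i =>
          match PySem.Str.pyGet? Sequence i with
          | some c => l.set i.toNat (pvRecodeChar c)
          | none   => l) cs
      = (PySem.List.pyRange start (cs.length : Int) 2).foldl
          (fun l i => l.set i.toNat (pvRecodeChar (cs.getD i.toNat ' '))) cs := by
    apply PySem.List.foldl_congr_mem
    intro acc i hi
    rw [PySem.List.mem_pyRange_iff_of_pos (by norm_num)] at hi
    have h0 : 0 ≤ i := le_trans (by rcases hstart01 with h | h <;> simp [h]) hi.1
    have hlt : i.toNat < cs.length := by omega
    have hqq : PySem.Str.pyGet? Sequence i = cs[i.toNat]? := by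
      conv_lhs => rw [show i = ((i.toNat : Nat) : Int) by omega]
      rw [PySem.Str.pyGet?_natCast, ← hcs]
    rw [List.getElem?_eq_getElem hlt] at hqq
    rw [hqq]
    simp [hlt]
  rw [pvA_fold, hBfold]
  simp only [List.nil_append]
  congr 1
  have hrange_nonneg : ∀ i ∈ PySem.List.pyRange start (cs.length : Int) 2, 0 ≤ i := by
    intro i hi
    rw [PySem.List.mem_pyRange_iff_of_pos (by norm_num)] at hi
    exact le_trans (by rcases hstart01 with h | h <;> simp [h]) hi.1
  apply List.ext_getElem
  · rw [pv_setAll_length _ (fun k => pvRecodeChar (cs.getD k ' ')) cs, pvSpecFrom_length]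
  · intro j hj1 hj2
    have hjlen : j < cs.length := by simpa [pvSpecFrom_length] using hj1
    rw [pvSpecFrom_getElem _ _ _ hjlen,
        pv_setAll_getElem _ hrange_nonneg (fun k => pvRecodeChar (cs.getD k ' ')) cs j hjlen]
    have hiff : ((j : Int) ∈ PySem.List.pyRange start (cs.length : Int) 2)
        ↔ PySem.Int.mod (1 + (2 - Position) + j + 2) 2 = 0 := by
      rw [PySem.List.mem_pyRange_iff_of_pos (by norm_num),
          PySem.Int.mod_eq_emod_of_pos (by norm_num)]
      constructor
      · rintro ⟨h1, h2, h3⟩; omega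
      · intro h
        refine ⟨by omega, by omega, by omega⟩
    split_ifs with h1 h2 h2
    · simp [List.getElem?_eq_getElem hjlen]
    · exact absurd (hiff.mpr (beq_iff_eq.mp h1)) h2
    · exact absurd (beq_iff_eq.mpr (hiff.mp h2)) h1
    · rfl
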